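-- pv_equiv track=rewrite | github.com/bca44/cs110 | Unit5/lab5d/pokemon_group.py | group_pokemon
-- ===== SOURCE A (Python) =====
-- def group_pokemon(lines, column):
--     """
--     lines: a list of lines, each line is a comma-separated list of values
--     column: an integer column number
--
--     Find all of the Pokemon who have the same value in the given column.
--
--     Return a dictionary that maps the column value to the list of Pokemon.
--     For example, if the column is the number 4, then the dictionary will
--     map the Pokemon type (water, fire) to a list of Pokemon of that type.
--     """
--     pokemon_dict = {}
--
--     for line in lines:
--         line = line.split(",")
--         key = line[int(column)]
--
--         if key not in pokemon_dict:
--             pokemon_dict[key] = []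
--
--         pokemon_dict[key].append(line[0])
--
--     return pokemon_dict
-- ===== SOURCE B (Python) =====
-- def group_pokemon(lines, column):
--     c = int(column)
--     pairs = [(parts[c], parts[0]) for parts in (line.split(",") for line in lines)]
--     keys = list(dict.fromkeys(k for k, _ in pairs))
--     return {k: [name for kk, name in pairs if kk == k] for k in keys}
-- ===== Notes on version B (the rewrite author's own statement) =====
-- stated objective: alternative
-- what changed: Replaces A's single pass that mutates a dict (membership test, insert-empty, append) per line with a three-stage pipeline: extract all (key, name) pairs, dedup the keys in first-occurrence order via dict.fromkeys, then build each group by filtering the pair list per key.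
import Mathlib
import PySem

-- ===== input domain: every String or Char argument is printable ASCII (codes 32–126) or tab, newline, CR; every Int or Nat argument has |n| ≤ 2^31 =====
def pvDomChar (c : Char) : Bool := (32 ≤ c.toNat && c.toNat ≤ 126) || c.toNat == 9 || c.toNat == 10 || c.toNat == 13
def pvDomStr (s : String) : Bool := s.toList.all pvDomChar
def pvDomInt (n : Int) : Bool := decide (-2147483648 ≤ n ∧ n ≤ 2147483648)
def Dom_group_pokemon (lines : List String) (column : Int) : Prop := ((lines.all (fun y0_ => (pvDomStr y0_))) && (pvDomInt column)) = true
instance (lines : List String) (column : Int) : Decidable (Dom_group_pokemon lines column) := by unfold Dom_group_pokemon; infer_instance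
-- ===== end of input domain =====

-- B replaces A's single hash-insertion pass by a three-stage pipeline (extract key/name
-- pairs, dedup the keys in first-occurrence order, emit one group per key by filtering);
-- objective: alternative decomposition, same observable result.

-- ===== PORT A =====
-- line.split(",") ("," ≠ "", so split? is always some; getD is never the default)
def pvSplit (line : String) : List String := (PySem.Str.split? line ",").getD []

def group_pokemon (lines : List String) (column : Int) : List (String × List String) :=
  (lines.foldl (fun d line =>
    let parts := pvSplit line
    let key := PySem.List.pyGetD parts column ""
    let d' := if d.contains key then d else d.insert key ([] : List String)
    d'.modify key [] (fun l => l ++ [PySem.List.pyGetD parts 0 ""])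
  ) PySem.Dict.empty).items

-- ===== PORT B =====
def group_pokemon_alt (lines : List String) (column : Int) : List (String × List String) :=
  let pairs := lines.map (fun line =>
    let parts := pvSplit line
    (PySem.List.pyGetD parts column "", PySem.List.pyGetD parts 0 ""))
  let keys := PySem.List.dedup (pairs.map (fun p => p.1))
  keys.map (fun k => (k, (pairs.filter (fun p => p.1 == k)).map (fun p => p.2)))

-- ===== PRECONDITION & SPEC =====
-- Pre_ excludes exactly the inputs where Python's line[int(column)] raises IndexError
-- (column outside the index range of some line's split).
def Pre_group_pokemon (lines : List String) (column : Int) : Prop :=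
  ∀ line ∈ lines, PySem.Raise.InRange (pvSplit line).length column
instance (lines : List String) (column : Int) : Decidable (Pre_group_pokemon lines column) := by
  unfold Pre_group_pokemon; infer_instance

def pvWitness_group_pokemon : List String × Int :=
  (["pikachu,yellow,electric", "squirtle,blue,water", "charmander,red,fire"], 2)

def Spec_group_pokemon (lines : List String) (column : Int) (out : List (String × List String)) : Prop := out = group_pokemon_alt lines column
instance (lines : List String) (column : Int) (out : List (String × List String)) : Decidable (Spec_group_pokemon lines column out) := by unfold Spec_group_pokemon; infer_instance

-- ===== CLAIM (what is proved, stated in full; the proofs are below) =====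
def Claim_equal_group_pokemon : Prop := ∀ (lines : List String) (column : Int), Dom_group_pokemon lines column → Pre_group_pokemon lines column → Spec_group_pokemon lines column (group_pokemon lines column)

-- ===== LEMMAS AND PROOFS =====

-- A's loop step, on the (key, name) pair it extracts from the line
def pvStepA (d : PySem.Dict String (List String)) (p : String × String) :
    PySem.Dict String (List String) :=
  let d' := if d.contains p.1 then d else d.insert p.1 ([] : List String)
  d'.modify p.1 [] (fun l => l ++ [p.2])

def pvPairs (lines : List String) (column : Int) : List (String × String) :=
  lines.map (fun line =>
    let parts := pvSplit line
    (PySem.List.pyGetD parts column "", PySem.List.pyGetD parts 0 ""))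

theorem pvA_eq_foldl_pairs (lines : List String) (column : Int) :
    group_pokemon lines column =
      ((pvPairs lines column).foldl pvStepA PySem.Dict.empty).items := by
  unfold group_pokemon pvPairs pvStepA
  rw [List.foldl_map]

-- the if-insert before the modify is invisible through getD
theorem pvStepA_getD (d : PySem.Dict String (List String)) (p : String × String) (c : String) :
    (pvStepA d p).getD c [] =
      if c = p.1 then d.getD c [] ++ [p.2] else d.getD c [] := by
  unfold pvStepA
  by_cases h : d.contains p.1 = true
  · simp only [h, if_true, PySem.Dict.getD_modify]
    by_cases hc : c = p.1
    · subst hc; simp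
    · simp [hc]
  · simp only [Bool.not_eq_true] at h
    have hn : d.get? p.1 = none := (PySem.Dict.get?_eq_none_iff_contains d p.1).mpr h
    simp only [h, Bool.false_eq_true, if_false, PySem.Dict.getD_modify]
    by_cases hc : c = p.1
    · subst hc
      simp [PySem.Dict.getD, hn]
    · simp [hc, PySem.Dict.getD_insert]

theorem pvStepA_keys (d : PySem.Dict String (List String)) (p : String × String) :
    (pvStepA d p).keys = PySem.Set.add d.keys p.1 := by
  unfold pvStepA
  by_cases h : d.contains p.1 = true
  · have hmem : p.1 ∈ d.keys := (PySem.Dict.contains_iff_mem_keys d p.1).mp h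
    simp only [h, if_true, PySem.Dict.keys_modify,
      PySem.Dict.keys_insert_of_contains d _ h, PySem.Set.add]
    simp [PySem.Set.contains, hmem]
  · simp only [Bool.not_eq_true] at h
    have hmem : p.1 ∉ d.keys := fun hm => by
      simp [(PySem.Dict.contains_iff_mem_keys d p.1).mpr hm] at h
    simp only [h, Bool.false_eq_true, if_false, PySem.Dict.keys_modify]
    rw [PySem.Dict.keys_insert_of_contains _ _ (PySem.Dict.contains_insert_self d p.1 _),
      PySem.Dict.keys_insert_of_not_contains d _ h]
    simp [PySem.Set.add, PySem.Set.contains, hmem]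

theorem pvFoldl_getD (ps : List (String × String)) (d : PySem.Dict String (List String)) (c : String) :
    (ps.foldl pvStepA d).getD c [] =
      d.getD c [] ++ (ps.filter (fun p => p.1 == c)).map (fun p => p.2) := by
  induction ps generalizing d with
  | nil => simp
  | cons p ps ih =>
    simp only [List.foldl_cons, ih, pvStepA_getD, List.filter_cons]
    by_cases hc : c = p.1
    · simp [hc, List.map_cons]
    · have : (p.1 == c) = false := by simpa [beq_iff_eq] using fun h => hc h.symm
      simp [hc, this]

theorem pvFoldl_keys (ps : List (String × String)) (d : PySem.Dict String (List String)) :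
    (ps.foldl pvStepA d).keys = PySem.Set.update d.keys (ps.map (fun p => p.1)) := by
  induction ps generalizing d with
  | nil => simp [PySem.Set.update]
  | cons p ps ih =>
    simp only [List.foldl_cons, ih, pvStepA_keys, List.map_cons, PySem.Set.update, List.foldl_cons]

theorem pvFoldl_nodup (ps : List (String × String)) (d : PySem.Dict String (List String))
    (h : d.keys.Nodup) : (ps.foldl pvStepA d).keys.Nodup := by
  induction ps generalizing d with
  | nil => exact h
  | cons p ps ih =>
    refine ih _ ?_
    rw [pvStepA_keys]
    exact PySem.Set.nodup_add _ _ h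

-- a dict with Nodup keys is the list of its keys paired with their looked-up values
theorem pvItems_eq_keys_map (d : PySem.Dict String (List String)) (h : d.keys.Nodup) :
    d.items = d.keys.map (fun k => (k, d.getD k [])) := by
  obtain ⟨l⟩ := d
  induction l with
  | nil => rfl
  | cons q l ih =>
    obtain ⟨k0, v0⟩ := q
    show (k0, v0) :: l =
      ((PySem.Dict.mk ((k0, v0) :: l)).keys).map
        (fun k => (k, (PySem.Dict.mk ((k0, v0) :: l)).getD k []))
    have hk : (PySem.Dict.mk ((k0, v0) :: l)).keys = k0 :: (PySem.Dict.mk l).keys := rfl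
    rw [hk] at h ⊢
    obtain ⟨hq, hl⟩ := List.nodup_cons.mp h
    rw [List.map_cons]
    have h1 : (PySem.Dict.mk ((k0, v0) :: l)).getD k0 [] = v0 := by
      simp [PySem.Dict.getD, PySem.Dict.get?_mk_cons]
    rw [h1]
    have h2 : (PySem.Dict.mk l).keys.map
        (fun k => (k, (PySem.Dict.mk ((k0, v0) :: l)).getD k [])) =
        (PySem.Dict.mk l).keys.map (fun k => (k, (PySem.Dict.mk l).getD k [])) := by
      apply List.map_congr_left
      intro k hkmem
      have hne : (k0 == k) = false := by
        simp only [beq_eq_false_iff_ne, ne_eq]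
        exact fun he => hq (he ▸ hkmem)
      simp [PySem.Dict.getD, PySem.Dict.get?_mk_cons, hne]
    rw [h2, ← ih hl]

-- ===== VERDICT (by name: the statement is the Claim_ definition above) =====
theorem pvAlt_eq (lines : List String) (column : Int) :
    group_pokemon_alt lines column =
      (PySem.List.dedup ((pvPairs lines column).map (fun p => p.1))).map
        (fun k => (k, ((pvPairs lines column).filter (fun p => p.1 == k)).map (fun p => p.2))) := rfl

theorem group_pokemon_spec : Claim_equal_group_pokemon := by
  intro lines column _ _
  unfold Spec_group_pokemon
  rw [pvA_eq_foldl_pairs, pvAlt_eq]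
  have hnodup : ((pvPairs lines column).foldl pvStepA PySem.Dict.empty).keys.Nodup :=
    pvFoldl_nodup _ _ (by simp [PySem.Dict.empty, PySem.Dict.keys])
  rw [pvItems_eq_keys_map _ hnodup]
  have hkeys : ((pvPairs lines column).foldl pvStepA PySem.Dict.empty).keys =
      PySem.List.dedup ((pvPairs lines column).map (fun p => p.1)) := by
    rw [pvFoldl_keys]
    simp [PySem.List.dedup_eq_ofList, PySem.Set.ofList, PySem.Set.update,
      PySem.Dict.empty, PySem.Dict.keys]
  rw [hkeys]
  apply List.map_congr_left
  intro k _
  rw [pvFoldl_getD]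
  simp [PySem.Dict.empty, PySem.Dict.getD, PySem.Dict.get?]
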